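-- pv_equiv track=rewrite | github.com/krzyswys/Algorythms-and-data-structures | Previous exams/2020-2021/egzamin_1/KchaosZad1.py | chaos_indexx
-- ===== SOURCE A (Python) =====
-- from queue import PriorityQueue
--
-- def chaos_indexx(T):
--     q = PriorityQueue()
--     [q.put((T[i], i)) for i in range(len(T))]
--     ans = 0
--     for i in range(len(T)):
--         num, id = q.get()
--         ans = max(abs(id - i), ans)
--     return ans
-- ===== SOURCE B (Python) =====
-- def chaos_indexx(T):
--     n = len(T)
--     ans = 0
--     for k in range(n):
--         r = sum(1 for j in range(n) if (T[j], j) < (T[k], k))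
--         ans = max(ans, abs(k - r))
--     return ans
-- ===== Notes on version B (the rewrite author's own statement) =====
-- stated objective: alternative
-- what changed: Replaces the priority-queue sort-and-pop with a sort-free counting of each element's stable rank (number of (value,index) pairs lexicographically smaller), taking the max of |index - rank| directly.
import Mathlib
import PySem

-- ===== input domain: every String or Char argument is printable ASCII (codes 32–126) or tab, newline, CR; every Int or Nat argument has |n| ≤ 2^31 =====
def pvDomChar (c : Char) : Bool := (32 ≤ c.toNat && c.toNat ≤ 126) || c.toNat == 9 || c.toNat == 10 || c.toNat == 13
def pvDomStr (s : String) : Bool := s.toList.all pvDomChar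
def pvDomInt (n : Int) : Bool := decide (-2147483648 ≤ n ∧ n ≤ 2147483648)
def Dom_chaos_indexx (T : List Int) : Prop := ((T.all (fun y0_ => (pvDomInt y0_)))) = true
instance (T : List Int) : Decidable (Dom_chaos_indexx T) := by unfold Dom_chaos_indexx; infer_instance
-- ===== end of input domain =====

-- B computes each element's stable rank by counting (value,index) pairs instead of sorting;
-- objective: alternative (sort-free) implementation, same return value.

-- ===== PORT A =====
-- PriorityQueue of tuples pops in lexicographic (value, index) order: sorted2 with the two keys.
def chaos_indexx (T : List Int) : Int :=
  let q := PySem.List.sorted2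
      ((PySem.List.pyRange 0 T.length 1).map (fun i => (PySem.List.pyGetD T i 0, i)))
      (fun p => p.1) (fun p => p.2) false
  (PySem.List.enumerate q 0).foldl (fun ans e => max |e.2.2 - e.1| ans) 0

-- ===== PORT B =====
-- r = sum(1 for j in range(n) if (T[j], j) < (T[k], k))  is a countP of the tuple comparison.
def chaos_indexx_alt (T : List Int) : Int :=
  (PySem.List.pyRange 0 T.length 1).foldl (fun ans k =>
    let r : Int := ((PySem.List.pyRange 0 T.length 1).countP (fun j =>
        decide (PySem.List.pyGetD T j 0 < PySem.List.pyGetD T k 0) ||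
        (decide (PySem.List.pyGetD T j 0 = PySem.List.pyGetD T k 0) && decide (j < k))) : Nat)
    max ans |k - r|) 0

-- ===== PRECONDITION & SPEC =====
def Spec_chaos_indexx (T : List Int) (out : Int) : Prop := out = chaos_indexx_alt T
instance (T : List Int) (out : Int) : Decidable (Spec_chaos_indexx T out) := by unfold Spec_chaos_indexx; infer_instance

-- ===== CLAIM (what is proved, stated in full; the proofs are below) =====
def Claim_equal_chaos_indexx : Prop := ∀ (T : List Int), Dom_chaos_indexx T → Spec_chaos_indexx T (chaos_indexx T)

-- ===== LEMMAS AND PROOFS =====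

-- the pair attached to index k
def pvPair (T : List Int) (k : Nat) : Int × Int := (T.getD k 0, (k : Int))

-- the (value, index) pairs in original order
def pvPairs (T : List Int) : List (Int × Int) := (List.range T.length).map (pvPair T)

-- rank of a pair = number of lexicographically smaller pairs, as a function into Int
def pvRank (T : List Int) (p : Int × Int) : Int :=
  ((pvPairs T).countP (fun y => decide (toLex y < toLex p)) : Nat)

def pvVal (T : List Int) (p : Int × Int) : Int := |p.2 - pvRank T p|

lemma pvPair_injective (T : List Int) : Function.Injective (pvPair T) := by
  intro a b h
  have := congrArg (fun p => p.2) h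
  simpa [pvPair] using this

lemma pvPairs_nodup (T : List Int) : (pvPairs T).Nodup :=
  (List.nodup_range).map (pvPair_injective T)

lemma pairs_eq (T : List Int) :
    (PySem.List.pyRange 0 T.length 1).map (fun i => (PySem.List.pyGetD T i 0, i)) = pvPairs T := by
  rw [PySem.List.pyRange_zero_nat, List.map_map]
  simp [pvPairs, pvPair, Function.comp]

lemma sorted2_eq_sorted_lex (xs : List (Int × Int)) :
    PySem.List.sorted2 xs (fun p => p.1) (fun p => p.2) false
      = PySem.List.sorted xs (fun p => (toLex p : Lex (Int × Int))) false := by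
  have hb : (fun a b : Int × Int => decide (a.1 < b.1) || (!decide (b.1 < a.1) && decide (a.2 < b.2)))
      = fun a b : Int × Int => decide ((toLex a : Lex (Int × Int)) < toLex b) := by
    funext a b
    by_cases h1 : a.1 < b.1 <;> by_cases h2 : b.1 < a.1 <;> by_cases h3 : a.2 < b.2 <;>
      simp [h1, h2, h3, Prod.Lex.lt_iff] <;> omega
  simp only [PySem.List.sorted2, PySem.List.sorted, hb]
  norm_num

lemma enum_getElem {α : Type} (xs : List α) (s : Int) (i : Nat) (h : i < xs.length) :
    (PySem.List.enumerate xs s)[i]'(by simpa [PySem.List.length_enumerate] using h)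
      = (s + i, xs[i]) := by
  induction xs generalizing s i with
  | nil => simp at h
  | cons x t ih =>
      cases i with
      | zero => simp [PySem.List.enumerate_cons]
      | succ i =>
          have h' : i < t.length := by simpa using h
          simp only [PySem.List.enumerate_cons, List.getElem_cons_succ]
          rw [ih (s+1) i h']
          have hcast : s + 1 + (i : Int) = s + ((i+1 : Nat) : Int) := by push_cast; ring
          rw [hcast]

-- strictly increasing list: the number of elements below the i-th is i
lemma countP_lt_getElem (zs : List (Int × Int))
    (hp : zs.Pairwise (fun a b => (toLex a : Lex (Int × Int)) < toLex b))
    (i : Nat) (h : i < zs.length) (a : Int × Int) (ha : zs[i] = a) :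
    zs.countP (fun y => decide ((toLex y : Lex (Int × Int)) < toLex a)) = i := by
  induction zs generalizing i a with
  | nil => simp at h
  | cons z t ih =>
      rcases List.pairwise_cons.mp hp with ⟨hz, ht⟩
      cases i with
      | zero =>
          simp only [List.getElem_cons_zero] at ha
          subst ha
          apply List.countP_eq_zero.mpr
          intro y hy
          rcases List.mem_cons.mp hy with rfl | hyt
          · simp
          · simp only [decide_eq_true_eq]
            exact fun hlt => absurd (hlt.trans (hz y hyt)) (lt_irrefl _)
      | succ i =>
          have h' : i < t.length := by simpa using h
          simp only [List.getElem_cons_succ] at ha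
          have hzlt : (toLex z : Lex (Int × Int)) < toLex a := ha ▸ hz _ (t.getElem_mem h')
          simp only [List.countP_cons]
          rw [ih ht i h' a ha]
          simp [hzlt]

-- the two tuple-comparison booleans coincide
lemma lex_decide_eq (T : List Int) (j k : Nat) :
    (decide (PySem.List.pyGetD T (j : Int) 0 < PySem.List.pyGetD T (k : Int) 0) ||
      (decide (PySem.List.pyGetD T (j : Int) 0 = PySem.List.pyGetD T (k : Int) 0) && decide ((j : Int) < (k : Int))))
      = decide ((toLex (pvPair T j) : Lex (Int × Int)) < toLex (pvPair T k)) := by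
  simp only [PySem.List.pyGetD_natCast]
  by_cases h1 : T.getD j 0 < T.getD k 0 <;> by_cases h2 : T.getD j 0 = T.getD k 0 <;>
    by_cases h3 : (j : Int) < (k : Int)  <;>
    simp [h3, Prod.Lex.lt_iff, pvPair]

-- B's inner count is the rank
lemma count_eq_rank (T : List Int) (k : Nat) :
    (List.countP (fun j =>
        decide (PySem.List.pyGetD T j 0 < PySem.List.pyGetD T (k : Int) 0) ||
        (decide (PySem.List.pyGetD T j 0 = PySem.List.pyGetD T (k : Int) 0) && decide (j < (k : Int))))
      (List.map (fun (i : Nat) => (i : Int)) (List.range T.length)) : Int) = pvRank T (pvPair T k) := by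
  unfold pvRank pvPairs
  rw [List.countP_map, List.countP_map]
  simp only [Function.comp_def]
  congr 2
  funext j
  exact lex_decide_eq T j k

theorem chaos_indexx_spec : Claim_equal_chaos_indexx := by
  intro T _
  unfold Spec_chaos_indexx chaos_indexx chaos_indexx_alt
  simp only [pairs_eq, sorted2_eq_sorted_lex]
  set zs := PySem.List.sorted (pvPairs T) (fun p => (toLex p : Lex (Int × Int))) false with hzs
  have hperm : zs.Perm (pvPairs T) := PySem.List.sorted_perm _ _ _
  have hnd : zs.Nodup := (hperm.nodup_iff).mpr (pvPairs_nodup T)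
  have hle : zs.Pairwise (fun a b => (toLex a : Lex (Int × Int)) ≤ toLex b) :=
    PySem.List.sorted_pairwise (pvPairs T) (fun p => (toLex p : Lex (Int × Int)))
  have hlt : zs.Pairwise (fun a b => (toLex a : Lex (Int × Int)) < toLex b) := by
    refine (hle.and hnd).imp ?_
    rintro a b ⟨h1, h2⟩
    exact lt_of_le_of_ne h1 (fun he => h2 (by simpa using congrArg ofLex he))
  -- the A-side value list is zs.map (pvVal T)
  have L1 : (PySem.List.enumerate zs 0).map (fun e => |e.2.2 - e.1|) = zs.map (pvVal T) := by
    apply List.ext_getElem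
    · simp [PySem.List.length_enumerate]
    · intro i h1 h2
      have hi : i < zs.length := by simpa using h2
      simp only [List.getElem_map]
      rw [enum_getElem zs 0 i hi]
      have hr : pvRank T zs[i] = (i : Int) := by
        unfold pvRank
        rw [← hperm.countP_eq, countP_lt_getElem zs hlt i hi zs[i] rfl]
      simp [pvVal, hr]
  -- A's fold equals fold of max over that list
  have hA : (PySem.List.enumerate zs 0).foldl (fun ans e => max |e.2.2 - e.1| ans) 0
      = (zs.map (pvVal T)).foldl (fun a v => max a v) 0 := by
    rw [← L1, List.foldl_map]
    refine congrFun (congrFun (congrArg _ ?_) _) _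
    funext a e
    exact max_comm _ _
  -- B's fold equals fold of max over (pvPairs T).map (pvVal T)
  have hB : (PySem.List.pyRange 0 T.length 1).foldl (fun ans k =>
        max ans |k - (((PySem.List.pyRange 0 T.length 1).countP (fun j =>
          decide (PySem.List.pyGetD T j 0 < PySem.List.pyGetD T k 0) ||
          (decide (PySem.List.pyGetD T j 0 = PySem.List.pyGetD T k 0) && decide (j < k)))) : Int)|) 0
      = ((pvPairs T).map (pvVal T)).foldl (fun a v => max a v) 0 := by
    rw [PySem.List.pyRange_zero_nat, List.foldl_map]
    unfold pvPairs
    rw [List.map_map, List.foldl_map]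
    refine PySem.List.foldl_congr_mem _ _ _ _ ?_
    intro a k _
    rw [count_eq_rank T k]
    simp [pvVal, pvPair, pvRank]
  -- conclude via permutation invariance of the max-fold
  have hfold : (zs.map (pvVal T)).foldl (fun a v => max a v) 0
      = ((pvPairs T).map (pvVal T)).foldl (fun a v => max a v) 0 := by
    haveI : RightCommutative (fun (a v : Int) => max a v) :=
      ⟨fun a b c => by rw [max_right_comm]⟩
    exact (hperm.map (pvVal T)).foldl_eq 0
  simp only [hA, hB, hfold]
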